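-- pv_equiv track=rewrite | github.com/ryuikaneko/cluster_mean_field | square__transverse_field_ising/ed_j1j2j3.py | make_num_mf3
-- ===== SOURCE A (Python) =====
-- def make_num_mf3(Lx,Ly):
--     list_num_mf3 = []
--     dist = 2
--     for y in range(Ly):
--         for x in range(Lx):
--             cnt = 0
--             if x+dist >= Lx:
--                 cnt += 1
--             if x-dist <= -1:
--                 cnt += 1
--             if y+dist >= Ly:
--                 cnt += 1
--             if y-dist <= -1:
--                 cnt += 1
--             list_num_mf3.append(cnt)
--     return list_num_mf3
-- ===== SOURCE B (Python) =====
-- def make_num_mf3(Lx, Ly):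
--     # separable in x and y: precompute 1D boundary-crossing tables, then combine
--     if Lx <= 0 or Ly <= 0:
--         return []
--     col = [(1 if x + 2 >= Lx else 0) + (1 if x - 2 <= -1 else 0) for x in range(Lx)]
--     row = [(1 if y + 2 >= Ly else 0) + (1 if y - 2 <= -1 else 0) for y in range(Ly)]
--     return [r + c for r in row for c in col]
-- ===== Notes on version B (the rewrite author's own statement) =====
-- stated objective: alternative
-- what changed: B exploits that the count is separable per axis: two 1D tables (row/col boundary contributions) are built once and combined, replacing the per-cell recomputation of all four boundary tests inside the nested loop.
import Mathlib
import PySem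

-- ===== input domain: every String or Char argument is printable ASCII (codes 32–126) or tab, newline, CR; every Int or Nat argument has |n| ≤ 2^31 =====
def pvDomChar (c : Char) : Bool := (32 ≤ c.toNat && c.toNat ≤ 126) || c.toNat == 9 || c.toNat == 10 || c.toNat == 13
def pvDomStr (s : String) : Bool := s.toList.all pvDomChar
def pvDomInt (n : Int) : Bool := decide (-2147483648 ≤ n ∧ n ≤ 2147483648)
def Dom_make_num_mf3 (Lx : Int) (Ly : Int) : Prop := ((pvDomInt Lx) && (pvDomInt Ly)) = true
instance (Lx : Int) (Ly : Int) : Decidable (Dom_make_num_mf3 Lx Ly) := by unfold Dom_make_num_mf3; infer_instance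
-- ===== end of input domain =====

-- B factors the per-cell count into x- and y-axis 1D tables combined by addition (alternative decomposition, same cost).

-- ===== PORT A =====
def make_num_mf3 (Lx : Int) (Ly : Int) : List Int :=
  (PySem.List.pyRange 0 Ly 1).foldl (fun acc y =>
    (PySem.List.pyRange 0 Lx 1).foldl (fun acc x =>
      let cnt : Int := 0
      let cnt := if x + 2 ≥ Lx then cnt + 1 else cnt
      let cnt := if x - 2 ≤ -1 then cnt + 1 else cnt
      let cnt := if y + 2 ≥ Ly then cnt + 1 else cnt
      let cnt := if y - 2 ≤ -1 then cnt + 1 else cnt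
      acc ++ [cnt]) acc) []

-- ===== PORT B =====
def make_num_mf3_alt (Lx : Int) (Ly : Int) : List Int :=
  if Lx ≤ 0 ∨ Ly ≤ 0 then [] else
  let col := (PySem.List.pyRange 0 Lx 1).map (fun x =>
    (if x + 2 ≥ Lx then (1 : Int) else 0) + (if x - 2 ≤ -1 then 1 else 0))
  let row := (PySem.List.pyRange 0 Ly 1).map (fun y =>
    (if y + 2 ≥ Ly then (1 : Int) else 0) + (if y - 2 ≤ -1 then 1 else 0))
  row.flatMap (fun r => col.map (fun c => r + c))

-- ===== PRECONDITION & SPEC =====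
def Spec_make_num_mf3 (Lx : Int) (Ly : Int) (out : List Int) : Prop := out = make_num_mf3_alt Lx Ly
instance (Lx : Int) (Ly : Int) (out : List Int) : Decidable (Spec_make_num_mf3 Lx Ly out) := by unfold Spec_make_num_mf3; infer_instance

-- ===== CLAIM (what is proved, stated in full; the proofs are below) =====
def Claim_equal_make_num_mf3 : Prop := ∀ (Lx : Int) (Ly : Int), Dom_make_num_mf3 Lx Ly → Spec_make_num_mf3 Lx Ly (make_num_mf3 Lx Ly)

-- ===== LEMMAS AND PROOFS =====

-- ===== VERDICT (by name: the statement is the Claim_ definition above) =====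
theorem make_num_mf3_spec : Claim_equal_make_num_mf3 := by
  intro Lx Ly _
  unfold Spec_make_num_mf3 make_num_mf3 make_num_mf3_alt
  by_cases h : Lx ≤ 0 ∨ Ly ≤ 0
  · rw [if_pos h]
    rcases h with h | h
    · simp [PySem.List.pyRange_one_eq_nil h]
    · simp [PySem.List.pyRange_one_eq_nil h]
  rw [if_neg h]
  simp only [PySem.List.foldl_append_singleton_eq_map, PySem.List.foldl_append_eq_flatMap,
    List.nil_append, List.map_map, List.flatMap_map]
  refine List.flatMap_congr ?_
  intro y _
  refine List.map_congr_left ?_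
  intro x _
  dsimp only [Function.comp]
  split_ifs <;> omega
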